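-- pv_equiv track=rewrite | github.com/siva9800/codemind-python | count_vowel_consonent_pairs_in_words.py | coun
-- ===== SOURCE A (Python) =====
-- def coun(n):
--     n=list(n)
--     v='aeiouAEIOU'
--     c=0
--     i=0
--     j=len(n)-1
--     for i in range(len(n)//2):
--         if (n[i] in v and n[j] not in v) or (n[i] not in v and n[j] in v):
--             c+=1
--         j-=1
--     return c
-- ===== SOURCE B (Python) =====
-- def coun(n):
--     v = 'aeiouAEIOU'
--     c = 0
--     while len(n) > 1:
--         c += (n[0] in v) != (n[-1] in v)
--         n = n[1:len(n) - 1]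
--     return c
-- ===== Notes on version B (the rewrite author's own statement) =====
-- stated objective: alternative
-- what changed: B replaces A's half-length index walk (i forward, j manually decremented) by structural consumption: it repeatedly tests the two endpoint characters of the string and strips them off with a slice until at most one character remains, so no index arithmetic or fixed-length list remains.
import Mathlib
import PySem

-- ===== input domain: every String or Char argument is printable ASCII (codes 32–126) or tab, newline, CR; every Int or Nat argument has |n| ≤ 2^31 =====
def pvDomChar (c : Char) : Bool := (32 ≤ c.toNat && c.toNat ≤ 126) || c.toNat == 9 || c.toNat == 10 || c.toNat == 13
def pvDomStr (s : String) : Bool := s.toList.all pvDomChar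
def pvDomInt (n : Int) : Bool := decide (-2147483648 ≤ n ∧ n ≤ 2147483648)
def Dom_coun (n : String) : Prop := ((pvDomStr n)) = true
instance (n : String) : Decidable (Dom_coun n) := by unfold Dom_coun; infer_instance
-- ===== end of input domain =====

-- B consumes the string structurally — test the two endpoints, strip them off by
-- slicing, repeat — instead of A's half-length index walk (alternative decomposition, same value).

-- ===== PORT A =====
-- A: walk i over the first half, j walks down from len-1; count xor-of-vowelness pairs.
def coun (n : String) : Int :=
  let nl := n.toList
  let v := "aeiouAEIOU".toList
  let res := (PySem.List.pyRange 0 (PySem.Int.floordiv (nl.length : Int) 2) 1).foldl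
    (fun (cj : Int × Int) i =>
      let a := PySem.List.pyGetD nl i ' '   -- n[i]; i always in range
      let b := PySem.List.pyGetD nl cj.2 ' ' -- n[j]; j always in range
      ((if (v.contains a && !(v.contains b)) || (!(v.contains a) && v.contains b)
        then cj.1 + 1 else cj.1), cj.2 - 1))
    (0, (nl.length : Int) - 1)
  res.1

-- ===== PORT B =====
-- B's while loop: while len(n) > 1, add (n[0] in v) != (n[-1] in v), n = n[1:len(n)-1].
def counAltLoop (l : List Char) (c : Int) : Int :=
  if h : 1 < l.length then
    counAltLoop (PySem.List.slice l (some 1) (some ((l.length : Int) - 1)))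
      (c + (if (("aeiouAEIOU".toList).contains (PySem.List.pyGetD l 0 ' ') !=
                ("aeiouAEIOU".toList).contains (PySem.List.pyGetD l (-1) ' '))
            then 1 else 0))
  else c
termination_by l.length
decreasing_by
  have hc : ((l.length : Int) - 1) = ((l.length - 1 : ℕ) : Int) := by omega
  rw [hc]
  have h1 : (1 : Int) = ((1 : ℕ) : Int) := rfl
  rw [h1, PySem.List.slice_natCast]
  simp only [List.length_take, List.length_drop]
  omega

def coun_alt (n : String) : Int := counAltLoop n.toList 0

-- ===== PRECONDITION & SPEC =====
def Spec_coun (n : String) (out : Int) : Prop := out = coun_alt n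
instance (n : String) (out : Int) : Decidable (Spec_coun n out) := by unfold Spec_coun; infer_instance

-- ===== CLAIM (what is proved, stated in full; the proofs are below) =====
def Claim_equal_coun : Prop := ∀ (n : String), Dom_coun n → Spec_coun n (coun n)

-- ===== LEMMAS AND PROOFS =====

/-- vowel test used by both ports -/
def pvIsV (c : Char) : Bool := ("aeiouAEIOU".toList).contains c

/-- the per-pair 0/1 contribution at mirror position i of list l -/
def pvH (l : List Char) (i : ℕ) : Int :=
  if pvIsV (l.getD i ' ') != pvIsV (l.getD (l.length - 1 - i) ' ') then 1 else 0

/-- the Boolean condition of A's branch is an xor -/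
lemma pvCond (a b : Bool) : ((a && !b) || (!a && b)) = (a != b) := by
  cases a <;> cases b <;> rfl

/-- A's loop characterised -/
lemma pvA_loop (l : List Char) : ∀ (k : ℕ) (c j : Int),
    (PySem.List.pyRange 0 (k : Int) 1).foldl
      (fun (cj : Int × Int) i =>
        ((if (("aeiouAEIOU".toList).contains (PySem.List.pyGetD l i ' ') &&
              !(("aeiouAEIOU".toList).contains (PySem.List.pyGetD l cj.2 ' ')) ||
              !(("aeiouAEIOU".toList).contains (PySem.List.pyGetD l i ' ')) &&
              ("aeiouAEIOU".toList).contains (PySem.List.pyGetD l cj.2 ' '))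
          then cj.1 + 1 else cj.1), cj.2 - 1))
      (c, j)
    = (c + ∑ i ∈ Finset.range k,
        (if pvIsV (PySem.List.pyGetD l (i : Int) ' ') != pvIsV (PySem.List.pyGetD l (j - i) ' ')
         then (1 : Int) else 0),
       j - k) := by
  intro k
  induction k with
  | zero => intro c j; simp [PySem.List.pyRange_one_eq_nil]
  | succ k ih =>
    intro c j
    have hcast : ((k + 1 : ℕ) : Int) = (k : Int) + 1 := by omega
    rw [hcast, PySem.List.pyRange_one_succ_right (by positivity), List.foldl_append, ih]
    simp only [List.foldl_cons, List.foldl_nil, Finset.sum_range_succ, Prod.mk.injEq]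
    refine ⟨?_, by ring⟩
    simp only [pvIsV, pvCond]
    split_ifs <;> ring

/-- A computes the half-range sum of pvH -/
lemma pvA_eq (n : String) :
    coun n = ∑ i ∈ Finset.range (n.toList.length / 2), pvH n.toList i := by
  unfold coun
  set l := n.toList with hl
  have hfd : PySem.Int.floordiv (l.length : Int) 2 = ((l.length / 2 : ℕ) : Int) := by
    exact_mod_cast PySem.Int.floordiv_natCast l.length 2
  simp only [hfd]
  rw [pvA_loop l (l.length / 2) 0 ((l.length : Int) - 1)]
  simp only [zero_add]
  apply Finset.sum_congr rfl
  intro i hi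
  have hi' : i < l.length / 2 := Finset.mem_range.mp hi
  have h1 : i < l.length := by omega
  have hj : (l.length : Int) - 1 - (i : Int) = ((l.length - 1 - i : ℕ) : Int) := by omega
  rw [hj, PySem.List.pyGetD_natCast, PySem.List.pyGetD_natCast]
  rfl

/-- B's step slice is tail-dropLast -/
lemma pvSlice_eq (l : List Char) (h : 1 < l.length) :
    PySem.List.slice l (some 1) (some ((l.length : Int) - 1)) = l.tail.dropLast := by
  have hc : ((l.length : Int) - 1) = ((l.length - 1 : ℕ) : Int) := by omega
  have h1 : (1 : Int) = ((1 : ℕ) : Int) := rfl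
  rw [hc, h1, PySem.List.slice_natCast, List.dropLast_eq_take]
  simp only [List.drop_one, List.length_tail]

/-- interior length -/
lemma pvInterior_len (l : List Char) : l.tail.dropLast.length = l.length - 2 := by
  simp only [List.length_dropLast, List.length_tail]
  omega

/-- interior getD is a shifted getD -/
lemma pvInterior_getD (l : List Char) (j : ℕ) (hj : j < l.length - 2) (d : Char) :
    (l.tail.dropLast).getD j d = l.getD (j + 1) d := by
  have h1 : j < l.tail.dropLast.length := by rw [pvInterior_len]; exact hj
  have h2 : j + 1 < l.length := by omega
  rw [List.getD_eq_getElem _ d h1, List.getD_eq_getElem l d h2]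
  simp [List.getElem_dropLast, List.getElem_tail]

/-- pvH shifts onto the interior -/
lemma pvH_shift (l : List Char) (i : ℕ) (hi : i < l.length / 2 - 1) :
    pvH l (i + 1) = pvH (l.tail.dropLast) i := by
  have hlen : 4 ≤ l.length := by omega
  unfold pvH
  rw [pvInterior_len, pvInterior_getD l i (by omega), pvInterior_getD l (l.length - 2 - 1 - i) (by omega)]
  have h1 : l.length - 2 - 1 - i + 1 = l.length - 1 - (i + 1) := by omega
  rw [h1]

/-- B's loop characterised -/
lemma pvB_loop : ∀ (k : ℕ) (l : List Char), l.length = k → ∀ c : Int,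
    counAltLoop l c = c + ∑ i ∈ Finset.range (l.length / 2), pvH l i := by
  intro k
  induction k using Nat.strong_induction_on with
  | _ k ih =>
    intro l hk c
    rw [counAltLoop]
    by_cases h : 1 < l.length
    · simp only [h, dif_pos]
      rw [pvSlice_eq l h]
      have hlen : l.tail.dropLast.length = l.length - 2 := pvInterior_len l
      rw [ih (l.length - 2) (by omega) _ (by omega)]
      have hhead : (if (("aeiouAEIOU".toList).contains (PySem.List.pyGetD l 0 ' ') !=
                ("aeiouAEIOU".toList).contains (PySem.List.pyGetD l (-1) ' '))
            then (1 : Int) else 0) = pvH l 0 := by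
        have hg0 : PySem.List.pyGetD l 0 ' ' = l.getD 0 ' ' := by
          have : (0 : Int) = ((0 : ℕ) : Int) := rfl
          rw [this, PySem.List.pyGetD_natCast]
        have hgl : PySem.List.pyGetD l (-1) ' ' = l.getD (l.length - 1) ' ' := by
          have hc2 : (-1 : Int) + (l.length : Int) = ((l.length - 1 : ℕ) : Int) := by omega
          simp only [PySem.List.pyGetD, PySem.List.pyGet?, PySem.List.pyIdx?]
          have hneg : ¬ (0 : Int) ≤ -1 := by norm_num
          simp only [hneg, if_false]
          have hlt : l.length - 1 < l.length := by omega
          rw [if_pos (by omega : -(l.length : Int) ≤ -1)]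
          simp [List.getElem?_eq_getElem hlt]
        rw [hg0, hgl]
        unfold pvH pvIsV
        have : l.length - 1 - 0 = l.length - 1 := by omega
        rw [this]
      rw [hhead]
      have hsum : ∑ i ∈ Finset.range (l.length / 2), pvH l i
          = pvH l 0 + ∑ i ∈ Finset.range (l.length / 2 - 1), pvH (l.tail.dropLast) i := by
        obtain ⟨m, hm⟩ : ∃ m, l.length / 2 = m + 1 := ⟨l.length / 2 - 1, by omega⟩
        have hm' : m = l.length / 2 - 1 := by omega
        conv_lhs => rw [hm]
        rw [Finset.sum_range_succ']
        have hstep : ∑ i ∈ Finset.range m, pvH l (i + 1)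
            = ∑ i ∈ Finset.range m, pvH (l.tail.dropLast) i := by
          apply Finset.sum_congr rfl
          intro i hi
          exact pvH_shift l i (by have := Finset.mem_range.mp hi; omega)
        rw [hstep, hm']; ring
      have hhalf : l.tail.dropLast.length / 2 = l.length / 2 - 1 := by
        rw [hlen]; omega
      rw [hhalf, hsum]; ring
    · simp only [h, dif_neg, not_false_iff]
      have : l.length / 2 = 0 := by omega
      rw [this]
      simp

-- ===== VERDICT (by name: the statement is the Claim_ definition above) =====
theorem coun_spec : Claim_equal_coun := by
  intro n _
  unfold Spec_coun coun_alt
  rw [pvA_eq, pvB_loop n.toList.length n.toList rfl 0, zero_add]
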